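-- pv_equiv track=rewrite | github.com/ParsaHaghighatgoo/Threes-game | three-phase1.py | L_kd
-- ===== SOURCE A (Python) =====
-- def  L_kd(mt,k,d):
--     temp = []
--     m = 0
--     m_dic = {}
--     i0 = 0
--     for i in range(len(mt)):
--         temp += [mt[i][3]]
--
--     for j in range(len(temp)):
--         if temp[j] == 0 :
--             m_dic[i0] = j
--             m += 1
--             i0 += 1
--
--     if m == 0 :
--         return mt
--     else :
--         jaygah = k%m
--         mt[m_dic[jaygah]][3] = d
--
--     return mt
-- ===== SOURCE B (Python) =====
-- def L_kd(mt, k, d):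
--     # Count the zero cells in column 3.
--     m = sum(row[3] == 0 for row in mt)
--     if m == 0:
--         return mt
--     # The (k % m)-th zero from the left is the (m - k % m)-th from the right:
--     # walk the rows BACKWARDS with a countdown and set that cell in place.
--     z = m - k % m
--     for row in reversed(mt):
--         if row[3] == 0:
--             if z == 1:
--                 row[3] = d
--             z -= 1
--     return mt
-- ===== Notes on version B (the rewrite author's own statement) =====
-- stated objective: alternative
-- what changed: B locates the target zero by its rank from the END: it converts k%m into a right rank and traverses the rows in reverse with a single countdown, instead of A's column copy plus dict mapping zero ranks to forward indices indexed by k%m.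
import Mathlib
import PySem

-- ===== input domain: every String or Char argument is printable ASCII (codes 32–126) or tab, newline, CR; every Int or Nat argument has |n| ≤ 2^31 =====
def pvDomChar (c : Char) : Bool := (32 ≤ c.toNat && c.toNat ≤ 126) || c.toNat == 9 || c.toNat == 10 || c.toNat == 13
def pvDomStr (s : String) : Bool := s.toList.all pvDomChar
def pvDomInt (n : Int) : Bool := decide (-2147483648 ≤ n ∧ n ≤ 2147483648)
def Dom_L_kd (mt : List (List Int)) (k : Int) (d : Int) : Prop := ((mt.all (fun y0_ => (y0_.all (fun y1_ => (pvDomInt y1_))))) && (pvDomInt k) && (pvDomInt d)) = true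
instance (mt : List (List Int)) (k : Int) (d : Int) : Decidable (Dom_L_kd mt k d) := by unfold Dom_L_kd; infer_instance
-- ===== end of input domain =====

-- B locates the target zero by its rank from the END (a reverse countdown), instead of
-- A's column copy plus dict of forward zero positions; both mutate mt in place in Python,
-- the theorem is about the returned value.

-- ===== PORT A =====
def L_kd (mt : List (List Int)) (k : Int) (d : Int) : List (List Int) :=
  -- temp = []; for i in range(len(mt)): temp += [mt[i][3]]
  let temp : List Int := (PySem.List.pyRange 0 (mt.length : Int) 1).foldl
    (fun acc i => acc ++ [PySem.List.pyGetD (PySem.List.pyGetD mt i []) 3 0]) []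
  -- m_dic = {}; m = 0; i0 = 0; for j in range(len(temp)): if temp[j] == 0: ...
  let st : PySem.Dict Int Int × Int × Int := (PySem.List.pyRange 0 (temp.length : Int) 1).foldl
    (fun st j =>
      if PySem.List.pyGetD temp j 0 = 0 then (st.1.insert st.2.2 j, st.2.1 + 1, st.2.2 + 1)
      else st)
    (PySem.Dict.empty, 0, 0)
  let m := st.2.1
  if m = 0 then mt
  else
    let jaygah := PySem.Int.mod k m
    let idx := st.1.getD jaygah 0
    PySem.List.pySetD mt idx (PySem.List.pySetD (PySem.List.pyGetD mt idx []) 3 d)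

-- ===== PORT B =====
-- 'for row in reversed(mt): ...' with countdown z: structural recursion that processes
-- the suffix first (= the reversed iteration order), threading z and rebuilding the rows;
-- Source B's in-place row mutation becomes replacing the row in the rebuilt list.
def goB (d : Int) : List (List Int) → Int → Int × List (List Int)
  | [], z => (z, [])
  | row :: rs, z =>
    let p := goB d rs z
    if PySem.List.pyGetD row 3 0 = 0 then
      ((p.1 - 1), (if p.1 = 1 then PySem.List.pySetD row 3 d else row) :: p.2)
    else (p.1, row :: p.2)

def L_kd_alt (mt : List (List Int)) (k : Int) (d : Int) : List (List Int) :=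
  -- m = sum(row[3] == 0 for row in mt)
  let m : Int := (mt.countP (fun row => PySem.List.pyGetD row 3 0 == 0) : Nat)
  if m = 0 then mt
  else (goB d mt (m - PySem.Int.mod k m)).2

-- ===== PRECONDITION & SPEC =====
-- Pre_ excludes exactly the inputs where Python A raises IndexError: some row of mt
-- shorter than 4 entries (mt[i][3] fails there).
def Pre_L_kd (mt : List (List Int)) (k : Int) (d : Int) : Prop :=
  ∀ r ∈ mt, 4 ≤ r.length
instance (mt : List (List Int)) (k : Int) (d : Int) : Decidable (Pre_L_kd mt k d) := by
  unfold Pre_L_kd; infer_instance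

def pvWitness_L_kd : List (List Int) × Int × Int := ([[1, 2, 3, 0], [5, 6, 7, 8]], 3, 2)

def Spec_L_kd (mt : List (List Int)) (k : Int) (d : Int) (out : List (List Int)) : Prop := out = L_kd_alt mt k d
instance (mt : List (List Int)) (k : Int) (d : Int) (out : List (List Int)) : Decidable (Spec_L_kd mt k d out) := by unfold Spec_L_kd; infer_instance

-- ===== CLAIM (what is proved, stated in full; the proofs are below) =====
def Claim_equal_L_kd : Prop := ∀ (mt : List (List Int)) (k : Int) (d : Int), Dom_L_kd mt k d → Pre_L_kd mt k d → Spec_L_kd mt k d (L_kd mt k d)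

-- ===== LEMMAS AND PROOFS =====

-- the column-3 value A copies into temp and both programs test against 0
def col3 (r : List Int) : Int := PySem.List.pyGetD r 3 0

-- number of zeros in a list of ints (reference for A's m and B's count)
def countZ : List Int → Int
  | [] => 0
  | x :: xs => (if x = 0 then 1 else 0) + countZ xs

-- position of the t-th zero (reference for A's m_dic values)
def nthZ : List Int → Int → Int
  | [], _ => 0
  | x :: xs, t => if x = 0 then (if t = 0 then 0 else nthZ xs (t - 1) + 1) else nthZ xs t + 1

-- A's second-loop body, as a function of the (index, value) pair
def stepA (st : PySem.Dict Int Int × Int × Int) (p : Int × Int) : PySem.Dict Int Int × Int × Int :=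
  if p.2 = 0 then (st.1.insert st.2.2 p.1, st.2.1 + 1, st.2.2 + 1) else st

theorem countZ_nonneg (ts : List Int) : 0 ≤ countZ ts := by
  induction ts with
  | nil => simp [countZ]
  | cons x xs ih => simp only [countZ]; split <;> omega

theorem nthZ_nonneg (ts : List Int) (t : Int) : 0 ≤ nthZ ts t := by
  induction ts generalizing t with
  | nil => simp [nthZ]
  | cons x xs ih => simp only [nthZ]; split <;> [skip; exact by have := ih t; omega]
                    split <;> [omega; exact by have := ih (t - 1); omega]

theorem temp_eq (mt : List (List Int)) :
    (PySem.List.pyRange 0 (mt.length : Int) 1).foldl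
      (fun acc i => acc ++ [PySem.List.pyGetD (PySem.List.pyGetD mt i []) 3 0]) []
      = mt.map col3 := by
  rw [PySem.List.foldl_pyRange_zero_pyGetD' mt ([] : List Int)
        (fun acc row => acc ++ [PySem.List.pyGetD row 3 0]) []]
  rw [PySem.List.foldl_append_singleton_eq_map]
  rfl

theorem fold_eq_enum (ts : List Int) (st : PySem.Dict Int Int × Int × Int) :
    (PySem.List.pyRange 0 (ts.length : Int) 1).foldl
      (fun st j =>
        if PySem.List.pyGetD ts j 0 = 0 then (st.1.insert st.2.2 j, st.2.1 + 1, st.2.2 + 1)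
        else st) st
      = (PySem.List.enumerate ts 0).foldl stepA st := by
  rw [PySem.List.enumerate_eq_map_pyRange ts 0, List.foldl_map]
  rfl

theorem fold_snd (ts : List Int) (s c : Int) (dic : PySem.Dict Int Int) :
    ((PySem.List.enumerate ts s).foldl stepA (dic, c, c)).2 = (c + countZ ts, c + countZ ts) := by
  induction ts generalizing s c dic with
  | nil => simp [countZ, PySem.List.enumerate_nil]
  | cons x xs ih =>
    rw [PySem.List.enumerate_cons, List.foldl_cons]
    by_cases hx : x = 0
    · simp only [stepA, hx, if_pos rfl, countZ, if_true]
      rw [ih (s + 1) (c + 1) (dic.insert c s)]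
      simp only [Prod.mk.injEq]
      omega
    · simp only [stepA, hx, if_neg hx, countZ, if_false]
      rw [ih (s + 1) c dic]
      simp [hx]

theorem fold_getD_lt (ts : List Int) (s c t : Int) (dic : PySem.Dict Int Int) (ht : t < c) :
    ((PySem.List.enumerate ts s).foldl stepA (dic, c, c)).1.getD t 0 = dic.getD t 0 := by
  induction ts generalizing s c dic with
  | nil => simp [PySem.List.enumerate_nil]
  | cons x xs ih =>
    rw [PySem.List.enumerate_cons, List.foldl_cons]
    by_cases hx : x = 0
    · simp only [stepA, hx, if_pos rfl, if_true]
      rw [ih (s + 1) (c + 1) (dic.insert c s) (by omega)]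
      rw [PySem.Dict.getD_insert]
      simp [show t ≠ c by omega]
    · simp only [stepA, if_neg hx]
      exact ih (s + 1) c dic ht

theorem fold_getD (ts : List Int) (s c t : Int) (dic : PySem.Dict Int Int)
    (h1 : c ≤ t) (h2 : t - c < countZ ts) :
    ((PySem.List.enumerate ts s).foldl stepA (dic, c, c)).1.getD t 0 = s + nthZ ts (t - c) := by
  induction ts generalizing s c dic with
  | nil => simp [countZ] at h2; omega
  | cons x xs ih =>
    rw [PySem.List.enumerate_cons, List.foldl_cons]
    by_cases hx : x = 0
    · subst hx
      simp only [stepA, if_pos rfl, if_true]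
      by_cases htc : t = c
      · rw [fold_getD_lt xs (s + 1) (c + 1) t (dic.insert c s) (by omega)]
        rw [PySem.Dict.getD_insert]
        simp [htc, nthZ]
      · have h2' : t - (c + 1) < countZ xs := by
          simp only [countZ, if_pos rfl, if_true] at h2; omega
        rw [ih (s + 1) (c + 1) (dic.insert c s) (by omega) h2']
        simp only [nthZ, if_pos rfl, if_true, if_neg (show t - c ≠ 0 by omega)]
        have h3 : t - (c + 1) = t - c - 1 := by omega
        rw [h3]; ring
    · have h2' : t - c < countZ xs := by
        simp only [countZ, if_neg hx] at h2; omega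
      simp only [stepA, if_neg hx]
      rw [ih (s + 1) c dic h1 h2']
      simp only [nthZ, if_neg hx]
      ring

theorem countP_eq (mt : List (List Int)) :
    ((mt.countP (fun row => PySem.List.pyGetD row 3 0 == 0) : Nat) : Int) = countZ (mt.map col3) := by
  induction mt with
  | nil => rfl
  | cons r rs ih =>
    rw [List.countP_cons]
    simp only [List.map_cons, countZ, col3]
    by_cases hz : PySem.List.pyGetD r 3 0 = 0
    · simp only [if_pos hz, hz, BEq.rfl, if_true]
      push_cast
      omega
    · simp [hz, ← ih]

theorem pyGetD_cons_succ' {α : Type} (x : α) (xs : List α) (n : Int) (dflt : α) (hn : 0 ≤ n) :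
    PySem.List.pyGetD (x :: xs) (n + 1) dflt = PySem.List.pyGetD xs n dflt := by
  obtain ⟨m, rfl⟩ := Int.eq_ofNat_of_zero_le hn
  have h : ((m : Int) + 1) = ((m + 1 : Nat) : Int) := by push_cast; ring
  rw [h, PySem.List.pyGetD_natCast, PySem.List.pyGetD_natCast]
  simp

theorem pySetD_cons_succ {α : Type} (x : α) (xs : List α) (n : Int) (v : α) (hn : 0 ≤ n) :
    PySem.List.pySetD (x :: xs) (n + 1) v = x :: PySem.List.pySetD xs n v := by
  rw [PySem.List.pySetD_of_nonneg, PySem.List.pySetD_of_nonneg]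
  · have h : (n + 1).toNat = n.toNat + 1 := by omega
    rw [h, List.set_cons_succ]
  · exact hn
  · omega

-- if the countdown starts above the number of zeros it never fires
theorem goB_no_fire (d : Int) (rows : List (List Int)) (z : Int)
    (h : countZ (rows.map col3) < z) :
    goB d rows z = (z - countZ (rows.map col3), rows) := by
  induction rows with
  | nil => simp [goB, countZ]
  | cons r rs ih =>
    simp only [List.map_cons, countZ, col3] at h ⊢
    by_cases hz : PySem.List.pyGetD r 3 0 = 0
    · rw [if_pos hz] at h ⊢
      simp only [goB, ih (by omega)]
      rw [if_pos hz, if_neg (show z - countZ (rs.map col3) ≠ 1 by omega)]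
      simp only [Prod.mk.injEq, and_true]
      omega
    · rw [if_neg hz] at h ⊢
      simp only [goB, ih (by omega)]
      rw [if_neg hz]
      simp

-- the countdown fires exactly at the t-th zero from the left when started at countZ - t
theorem goB_eq (d : Int) (rows : List (List Int)) (t : Int)
    (h0 : 0 ≤ t) (h1 : t < countZ (rows.map col3)) :
    goB d rows (countZ (rows.map col3) - t)
      = (-t, PySem.List.pySetD rows (nthZ (rows.map col3) t)
          (PySem.List.pySetD (PySem.List.pyGetD rows (nthZ (rows.map col3) t) []) 3 d)) := by
  induction rows generalizing t with
  | nil => simp [countZ] at h1; omega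
  | cons r rs ih =>
    simp only [List.map_cons] at h1 ⊢
    by_cases hz : col3 r = 0
    · have hc : countZ (col3 r :: rs.map col3) = 1 + countZ (rs.map col3) := by
        simp [countZ, hz]
      by_cases ht : t = 0
      · subst ht
        rw [hc]
        have hnf := goB_no_fire d rs (1 + countZ (rs.map col3) - 0) (by omega)
        simp only [goB, hnf]
        simp only [col3] at hz
        rw [if_pos hz, if_pos (by omega)]
        simp only [nthZ, col3, hz, if_pos rfl, if_true]
        rw [PySem.List.pySetD_of_nonneg (i := 0) (h := le_rfl)]
        simp only [Int.toNat_zero, List.set_cons_zero]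
        rw [PySem.List.pyGetD_zero_cons]
        simp only [Prod.mk.injEq, and_true]
        omega
      · have h1' : t - 1 < countZ (rs.map col3) := by rw [hc] at h1; omega
        have hstart : countZ (col3 r :: rs.map col3) - t = countZ (rs.map col3) - (t - 1) := by
          rw [hc]; ring
        rw [hstart]
        simp only [goB, ih (t - 1) (by omega) h1']
        simp only [col3] at hz
        rw [if_pos hz, if_neg (show -(t - 1) ≠ 1 by omega)]
        simp only [nthZ, col3, hz, if_pos rfl, if_true, if_neg ht]
        have hn : 0 ≤ nthZ (rs.map col3) (t - 1) := nthZ_nonneg _ _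
        rw [pyGetD_cons_succ' _ _ _ _ hn, pySetD_cons_succ _ _ _ _ hn]
        simp only [Prod.mk.injEq, and_true]
        omega
    · have hc : countZ (col3 r :: rs.map col3) = countZ (rs.map col3) := by
        simp [countZ, hz]
      have h1' : t < countZ (rs.map col3) := by rw [hc] at h1; omega
      rw [hc]
      simp only [goB, ih t h0 h1']
      simp only [col3] at hz
      rw [if_neg hz]
      simp only [nthZ, col3, hz, if_neg hz, if_false]
      have hn : 0 ≤ nthZ (rs.map col3) t := nthZ_nonneg _ _
      rw [pyGetD_cons_succ' _ _ _ _ hn, pySetD_cons_succ _ _ _ _ hn]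

-- ===== VERDICT (by name: the statement is the Claim_ definition above) =====
theorem L_kd_spec : Claim_equal_L_kd := by
  intro mt k d _ _
  unfold Spec_L_kd L_kd L_kd_alt
  dsimp only
  rw [temp_eq, fold_eq_enum, countP_eq]
  have hsnd := fold_snd (mt.map col3) 0 0 PySem.Dict.empty
  set res := (PySem.List.enumerate (mt.map col3) 0).foldl stepA (PySem.Dict.empty, 0, 0)
  have hm1 : res.2.1 = countZ (mt.map col3) := by rw [hsnd]; simp
  rw [hm1]
  by_cases hz : countZ (mt.map col3) = 0
  · simp [hz]
  · simp only [hz, if_neg, if_false]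
    have hcpos : 0 < countZ (mt.map col3) := lt_of_le_of_ne (countZ_nonneg _) (Ne.symm hz)
    set t := PySem.Int.mod k (countZ (mt.map col3))
    have ht0 : 0 ≤ t := PySem.Int.mod_nonneg _ hcpos
    have ht1 : t < countZ (mt.map col3) := PySem.Int.mod_lt _ hcpos
    have hget : res.1.getD t 0 = 0 + nthZ (mt.map col3) (t - 0) :=
      fold_getD _ 0 0 t _ ht0 (by omega)
    rw [hget]
    simp only [zero_add, sub_zero]
    rw [goB_eq d mt t ht0 ht1]
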